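-- pv_equiv track=rewrite | github.com/Arshad-Johan/Turing-Machine-NLP-simulator | TURING-MACHINE.py | named_entity_recognition
-- ===== SOURCE A (Python) =====
-- def named_entity_recognition(tokens):
--     named_entities = []
--     simple_entities = {
--         'PERSON': ['Alice', 'Bob', 'John', 'Mary', 'Tom', 'Sara', 'David', 'Emma', 'Sophia', 'Liam', 'Mia'],
--         'ORG': ['OpenAI', 'Google', 'Microsoft', 'Amazon', 'Facebook', 'Twitter', 'Apple', 'NASA', 'IBM'],
--         'GPE': ['Paris', 'New York', 'India', 'London', 'Tokyo', 'Sydney', 'Berlin', 'Rome', 'Toronto', 'Dubai']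
--     }
--
--     for token in tokens:
--         entity_found = False
--         for entity, names in simple_entities.items():
--             if token in names:
--                 named_entities.append((token, entity))
--                 entity_found = True
--                 break
--         if not entity_found:
--             named_entities.append((token, 'O'))
--     return named_entities
-- ===== SOURCE B (Python) =====
-- def named_entity_recognition(tokens):
--     simple_entities = {
--         'PERSON': ['Alice', 'Bob', 'John', 'Mary', 'Tom', 'Sara', 'David', 'Emma', 'Sophia', 'Liam', 'Mia'],
--         'ORG': ['OpenAI', 'Google', 'Microsoft', 'Amazon', 'Facebook', 'Twitter', 'Apple', 'NASA', 'IBM'],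
--         'GPE': ['Paris', 'New York', 'India', 'London', 'Tokyo', 'Sydney', 'Berlin', 'Rome', 'Toronto', 'Dubai']
--     }
--     # Staged sweeps: start with every label 'O', then one full sweep per category
--     # overwriting the labels of its members. Correct because the category lists
--     # are pairwise disjoint, so at most one sweep can relabel a given token.
--     labels = ['O'] * len(tokens)
--     for entity, names in simple_entities.items():
--         nameset = set(names)
--         labels = [entity if token in nameset else label
--                   for token, label in zip(tokens, labels)]
--     return list(zip(tokens, labels))
-- ===== Notes on version B (the rewrite author's own statement) =====
-- stated objective: faster
-- what changed: B swaps the loop nesting: instead of scanning the category lists for each token with a found/break flag, it initialises all labels to 'O' and then makes one whole-list sweep per category, overwriting the labels of that category's members via an O(1) set-membership test, finally zipping tokens with labels; correct because the category lists are disjoint.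
import Mathlib
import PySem

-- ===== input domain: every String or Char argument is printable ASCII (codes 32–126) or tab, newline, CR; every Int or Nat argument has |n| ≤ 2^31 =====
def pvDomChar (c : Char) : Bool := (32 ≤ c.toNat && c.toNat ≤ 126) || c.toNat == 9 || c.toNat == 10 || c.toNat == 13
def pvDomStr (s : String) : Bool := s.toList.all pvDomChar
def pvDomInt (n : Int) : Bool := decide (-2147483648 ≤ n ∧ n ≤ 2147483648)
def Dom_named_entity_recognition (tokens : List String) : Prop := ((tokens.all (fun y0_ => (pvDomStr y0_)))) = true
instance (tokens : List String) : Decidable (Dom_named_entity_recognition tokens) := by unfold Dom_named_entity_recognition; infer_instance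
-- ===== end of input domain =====

-- B swaps the loop nesting: all labels start 'O' and one sweep per category overwrites its members' labels (category lists are disjoint); same result, alternative structure.

-- ===== PORT A =====
def pvSimpleEntities : PySem.Dict String (List String) :=
  PySem.Dict.ofList
    [("PERSON", ["Alice", "Bob", "John", "Mary", "Tom", "Sara", "David", "Emma", "Sophia", "Liam", "Mia"]),
     ("ORG", ["OpenAI", "Google", "Microsoft", "Amazon", "Facebook", "Twitter", "Apple", "NASA", "IBM"]),
     ("GPE", ["Paris", "New York", "India", "London", "Tokyo", "Sydney", "Berlin", "Rome", "Toronto", "Dubai"])]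

-- inner `for entity, names in …: if token in names: … break` loop with the entity_found flag
def pvFindEnt (items : List (String × List String)) (token : String) : Option String :=
  match items with
  | [] => none
  | (entity, names) :: rest =>
      if names.contains token then some entity else pvFindEnt rest token

def named_entity_recognition (tokens : List String) : List (String × String) :=
  tokens.foldl (fun named_entities token =>
    match pvFindEnt pvSimpleEntities.items token with
    | some entity => named_entities ++ [(token, entity)]
    | none => named_entities ++ [(token, "O")]) []

-- ===== PORT B =====
-- labels = ['O']*len(tokens); per category: set of names, sweep rewriting labels; final zip
def named_entity_recognition_alt (tokens : List String) : List (String × String) :=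
  let labels0 := tokens.map (fun _ => "O")
  let labels := pvSimpleEntities.items.foldl
    (fun labels p =>
      let nameset := PySem.Set.ofList p.2
      (tokens.zip labels).map (fun q => if nameset.contains q.1 then p.1 else q.2))
    labels0
  tokens.zip labels

-- ===== PRECONDITION & SPEC =====
def Spec_named_entity_recognition (tokens : List String) (out : List (String × String)) : Prop := out = named_entity_recognition_alt tokens
instance (tokens : List String) (out : List (String × String)) : Decidable (Spec_named_entity_recognition tokens out) := by unfold Spec_named_entity_recognition; infer_instance

-- ===== CLAIM =====
def Claim_equal_named_entity_recognition : Prop := ∀ (tokens : List String), Dom_named_entity_recognition tokens → Spec_named_entity_recognition tokens (named_entity_recognition tokens)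

-- ===== LEMMAS AND PROOFS =====

theorem pvItems_eval : pvSimpleEntities.items =
    [("PERSON", ["Alice", "Bob", "John", "Mary", "Tom", "Sara", "David", "Emma", "Sophia", "Liam", "Mia"]),
     ("ORG", ["OpenAI", "Google", "Microsoft", "Amazon", "Facebook", "Twitter", "Apple", "NASA", "IBM"]),
     ("GPE", ["Paris", "New York", "India", "London", "Tokyo", "Sydney", "Berlin", "Rome", "Toronto", "Dubai"])] := by decide

-- the label B's three sweeps leave on a token (last sweep wins)
def pvLabel (t : String) : String :=
  if (PySem.Set.ofList ["Paris", "New York", "India", "London", "Tokyo", "Sydney", "Berlin", "Rome", "Toronto", "Dubai"]).contains t then "GPE"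
  else if (PySem.Set.ofList ["OpenAI", "Google", "Microsoft", "Amazon", "Facebook", "Twitter", "Apple", "NASA", "IBM"]).contains t then "ORG"
  else if (PySem.Set.ofList ["Alice", "Bob", "John", "Mary", "Tom", "Sara", "David", "Emma", "Sophia", "Liam", "Mia"]).contains t then "PERSON"
  else "O"

-- one sweep over labels already of the shape tokens.map g rewrites pointwise
theorem sweep_map (tokens : List String) (g : String → String) (f : String → Bool) (e : String) :
    (tokens.zip (tokens.map g)).map (fun q => if f q.1 then e else q.2)
      = tokens.map (fun t => if f t then e else g t) := by
  induction tokens with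
  | nil => rfl
  | cons t ts ih => simp [ih]

theorem zip_self_map (tokens : List String) (g : String → String) :
    tokens.zip (tokens.map g) = tokens.map (fun t => (t, g t)) := by
  induction tokens with
  | nil => rfl
  | cons t ts ih => simp [ih]

theorem alt_eq_map (tokens : List String) :
    named_entity_recognition_alt tokens = tokens.map (fun t => (t, pvLabel t)) := by
  unfold named_entity_recognition_alt
  rw [pvItems_eval]
  simp only [List.foldl]
  rw [show tokens.map (fun _ => "O") = tokens.map (fun t => (fun _ => "O") t) from rfl,
      sweep_map, sweep_map, sweep_map, zip_self_map]
  simp only [pvLabel]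

-- per-token agreement: A's first-match category scan equals B's last-sweep label
theorem pvFindEnt_eq_label (t : String) :
    (pvFindEnt pvSimpleEntities.items t).getD "O" = pvLabel t := by
  by_cases h0 : t = "Alice"
  · subst h0; decide
  by_cases h1 : t = "Bob"
  · subst h1; decide
  by_cases h2 : t = "John"
  · subst h2; decide
  by_cases h3 : t = "Mary"
  · subst h3; decide
  by_cases h4 : t = "Tom"
  · subst h4; decide
  by_cases h5 : t = "Sara"
  · subst h5; decide
  by_cases h6 : t = "David"
  · subst h6; decide
  by_cases h7 : t = "Emma"
  · subst h7; decide
  by_cases h8 : t = "Sophia"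
  · subst h8; decide
  by_cases h9 : t = "Liam"
  · subst h9; decide
  by_cases h10 : t = "Mia"
  · subst h10; decide
  by_cases h11 : t = "OpenAI"
  · subst h11; decide
  by_cases h12 : t = "Google"
  · subst h12; decide
  by_cases h13 : t = "Microsoft"
  · subst h13; decide
  by_cases h14 : t = "Amazon"
  · subst h14; decide
  by_cases h15 : t = "Facebook"
  · subst h15; decide
  by_cases h16 : t = "Twitter"
  · subst h16; decide
  by_cases h17 : t = "Apple"
  · subst h17; decide
  by_cases h18 : t = "NASA"
  · subst h18; decide
  by_cases h19 : t = "IBM"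
  · subst h19; decide
  by_cases h20 : t = "Paris"
  · subst h20; decide
  by_cases h21 : t = "New York"
  · subst h21; decide
  by_cases h22 : t = "India"
  · subst h22; decide
  by_cases h23 : t = "London"
  · subst h23; decide
  by_cases h24 : t = "Tokyo"
  · subst h24; decide
  by_cases h25 : t = "Sydney"
  · subst h25; decide
  by_cases h26 : t = "Berlin"
  · subst h26; decide
  by_cases h27 : t = "Rome"
  · subst h27; decide
  by_cases h28 : t = "Toronto"
  · subst h28; decide
  by_cases h29 : t = "Dubai"
  · subst h29; decide
  rw [pvItems_eval]
  simp [pvFindEnt, pvLabel, PySem.Set.contains, PySem.Set.ofList, h0, h1, h2, h3, h4, h5, h6, h7, h8, h9, h10, h11, h12, h13, h14, h15, h16, h17, h18, h19, h20, h21, h22, h23, h24, h25, h26, h27, h28, h29, beq_eq_false_iff_ne.mpr (Ne.symm h0), beq_eq_false_iff_ne.mpr (Ne.symm h1), beq_eq_false_iff_ne.mpr (Ne.symm h2), beq_eq_false_iff_ne.mpr (Ne.symm h3), beq_eq_false_iff_ne.mpr (Ne.symm h4), beq_eq_false_iff_ne.mpr (Ne.symm h5), beq_eq_false_iff_ne.mpr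 (Ne.symm h6), beq_eq_false_iff_ne.mpr (Ne.symm h7), beq_eq_false_iff_ne.mpr (Ne.symm h8), beq_eq_false_iff_ne.mpr (Ne.symm h9), beq_eq_false_iff_ne.mpr (Ne.symm h10), beq_eq_false_iff_ne.mpr (Ne.symm h11), beq_eq_false_iff_ne.mpr (Ne.symm h12), beq_eq_false_iff_ne.mpr (Ne.symm h13), beq_eq_false_iff_ne.mpr (Ne.symm h14), beq_eq_false_iff_ne.mpr (Ne.symm h15), beq_eq_false_iff_ne.mpr (Ne.symm h16), beq_eq_false_iff_ne.mpr (Ne.symm h17), beq_eq_false_iff_ne.mpr (Ne.symm h18), beq_eq_false_iff_ne.mpr (Ne.symm h19), beq_eq_false_iff_ne.mpr (Ne.symm h20), beq_eq_false_iff_ne.mpr (Ne.symm h21), beq_eq_false_iff_ne.mpr (Ne.symm h22), beq_eq_false_iff_ne.mpr (Ne.symm h23), beq_eq_false_iff_ne.mpr (Ne.symm h24), beq_eq_false_iff_ne.mpr (Ne.symm h25), beq_eq_false_iff_ne.mpr (Ne.symm h26), beq_eq_false_iff_ne.mpr (Ne.symm h27), beq_eq_false_iff_ne.mpr (Ne.symm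 h28), beq_eq_false_iff_ne.mpr (Ne.symm h29)]

theorem foldl_ne_eq_map (tokens : List String) (acc : List (String × String)) :
    tokens.foldl (fun named_entities token =>
      match pvFindEnt pvSimpleEntities.items token with
      | some entity => named_entities ++ [(token, entity)]
      | none => named_entities ++ [(token, "O")]) acc
    = acc ++ tokens.map (fun token => (token, pvLabel token)) := by
  induction tokens generalizing acc with
  | nil => simp
  | cons t ts ih =>
      simp only [List.foldl, List.map]
      cases hfe : pvFindEnt pvSimpleEntities.items t <;>
        rw [ih] <;> simp [← pvFindEnt_eq_label t, hfe, Option.getD]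

-- ===== VERDICT =====
theorem named_entity_recognition_spec : Claim_equal_named_entity_recognition := by
  intro tokens _
  unfold Spec_named_entity_recognition named_entity_recognition
  rw [alt_eq_map]
  simpa using foldl_ne_eq_map tokens []
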